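-- pv_equiv track=rewrite | github.com/sofa-framework/SofaPython3 | scripts/sofaStubgen.py | select_single_template
-- ===== SOURCE A (Python) =====
-- def select_single_template(template_list):
--     """ returns a single template"""
--     for dim in ["Vec3", "Rigid3", "Vec2", "Rigid2", "Vec1", "Quatd"]:
--         for template in template_list:
--             if "Cuda" not in template and dim in template:
--                 return template
--
--     for template in template_list:
--         return template
--
--     return ""
-- ===== SOURCE B (Python) =====
-- def select_single_template(template_list):
--     """ returns a single template"""
--     dims = ["Vec3", "Rigid3", "Vec2", "Rigid2", "Vec1", "Quatd"]
--     best = None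
--     best_rank = len(dims)
--     for template in template_list:
--         if "Cuda" in template:
--             continue
--         rank = next((i for i, d in enumerate(dims) if d in template), len(dims))
--         if rank < best_rank:
--             best, best_rank = template, rank
--     if best is not None:
--         return best
--     return template_list[0] if template_list else ""
-- ===== Notes on version B (the rewrite author's own statement) =====
-- stated objective: alternative
-- what changed: Replaces the 6 sequential scans of the list (one per priority dimension) by a single pass that computes each non-Cuda template's priority rank and keeps the first template with the strictly smallest rank, falling back to the first element or ''.
import Mathlib
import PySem

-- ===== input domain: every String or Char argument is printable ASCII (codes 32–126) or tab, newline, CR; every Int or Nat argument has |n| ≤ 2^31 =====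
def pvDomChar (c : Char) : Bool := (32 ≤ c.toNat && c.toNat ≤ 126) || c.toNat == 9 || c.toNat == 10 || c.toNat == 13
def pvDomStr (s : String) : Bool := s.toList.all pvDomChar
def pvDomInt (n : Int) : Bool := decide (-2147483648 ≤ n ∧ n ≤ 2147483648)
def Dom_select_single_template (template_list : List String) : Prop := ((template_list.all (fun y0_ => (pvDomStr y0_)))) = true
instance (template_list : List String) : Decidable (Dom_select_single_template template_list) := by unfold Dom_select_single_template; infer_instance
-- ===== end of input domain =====

-- B replaces A's six sequential scans of the list (one per priority dimension) by a single
-- rank-computing pass keeping the first template of strictly smallest rank; same cost class.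


-- ===== PORT A =====
-- the literal list of priority dimensions A iterates over
def pvDims : List String := ["Vec3", "Rigid3", "Vec2", "Rigid2", "Vec1", "Quatd"]

-- A's outer for-with-return = findSome? over the dims; inner for-with-return = find?;
-- the trailing 'for template in template_list: return template' = head, else "".
def select_single_template (template_list : List String) : String :=
  match pvDims.findSome? (fun dim =>
      template_list.find? (fun t => !PySem.Str.isIn "Cuda" t && PySem.Str.isIn dim t)) with
  | some t => t
  | none =>
    match template_list with
    | t :: _ => t
    | [] => ""

-- ===== PORT B =====
-- rank of a template = next((i for i, d in enumerate(dims) if d in template), len(dims))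
def pvRank (t : String) : Nat := pvDims.findIdx (fun d => PySem.Str.isIn d t)

-- B's single loop: skip Cuda templates, keep the first template of strictly smallest rank
def pvLoop : List String → Option String → Nat → Option String
  | [], best, _ => best
  | t :: rest, best, bestRank =>
    if PySem.Str.isIn "Cuda" t then
      pvLoop rest best bestRank
    else
      let r := pvRank t
      if r < bestRank then pvLoop rest (some t) r
      else pvLoop rest best bestRank

def select_single_template_alt (template_list : List String) : String :=
  match pvLoop template_list none pvDims.length with
  | some t => t
  | none =>
    match template_list with
    | t :: _ => t
    | [] => ""

-- ===== PRECONDITION & SPEC =====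
def Spec_select_single_template (template_list : List String) (out : String) : Prop := out = select_single_template_alt template_list
instance (template_list : List String) (out : String) : Decidable (Spec_select_single_template template_list out) := by unfold Spec_select_single_template; infer_instance

-- ===== CLAIM (what is proved, stated in full; the proofs are below) =====
def Claim_equal_select_single_template : Prop := ∀ (template_list : List String), Dom_select_single_template template_list → Spec_select_single_template template_list (select_single_template template_list)

-- ===== LEMMAS AND PROOFS =====

-- the per-index search A performs, indexed by position in pvDims
def pvFindAt (l : List String) (i : Nat) : Option String :=
  l.find? (fun t => !PySem.Str.isIn "Cuda" t && PySem.Str.isIn (pvDims.getD i "") t)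

lemma findSome?_congr_mem {α β : Type} {l : List α} {f g : α → Option β}
    (h : ∀ a ∈ l, f a = g a) : l.findSome? f = l.findSome? g := by
  induction l with
  | nil => rfl
  | cons a l ih =>
    simp only [List.findSome?_cons, h a (List.mem_cons_self ..),
      ih (fun b hb => h b (List.mem_cons_of_mem _ hb))]

-- invariant of B's loop: with accumulator (best, r), the result is A's chained search
-- restricted to ranks < r, falling back to best
lemma pvLoop_eq (l : List String) : ∀ (best : Option String) (r : Nat), r ≤ pvDims.length →
    pvLoop l best r = ((List.range r).findSome? (pvFindAt l)).elim best some := by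
  induction l with
  | nil =>
    intro best r _
    have hnone : (List.range r).findSome? (pvFindAt []) = none := by
      rw [List.findSome?_eq_none_iff]
      intro i _; rfl
    simp [pvLoop, hnone]
  | cons t l ih =>
    intro best r hr
    by_cases hc : PySem.Str.isIn "Cuda" t = true
    · have hc' : PySem.Chars.isIn ['C', 'u', 'd', 'a'] t.toList = true := by simpa using hc
      have hf : ∀ i ∈ List.range r, pvFindAt (t :: l) i = pvFindAt l i := by
        intro i _
        simp [pvFindAt, hc']
      rw [pvLoop, if_pos hc, ih best r hr, findSome?_congr_mem hf]
    · have hc' : PySem.Chars.isIn ['C', 'u', 'd', 'a'] t.toList = false := by simpa using hc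
      by_cases hlt : pvRank t < r
      · -- t beats the accumulator: the rank-(pvRank t) search hits t first
        have hil : pvRank t < pvDims.length := lt_of_lt_of_le hlt hr
        have hsplit : List.range r
            = List.range (pvRank t) ++ [pvRank t]
              ++ (List.range (r - (pvRank t + 1))).map ((pvRank t + 1) + ·) := by
          have h1 : r = (pvRank t + 1) + (r - (pvRank t + 1)) := by omega
          rw [h1, List.range_add, List.range_succ]; simp
        have hp' : PySem.Chars.isIn (pvDims[pvRank t]?.getD "").toList t.toList = true := by
          have h1 : pvDims[pvRank t]?.getD "" = pvDims[pvRank t]'hil := by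
            simp [List.getElem?_eq_getElem hil]
          rw [h1]
          simpa using List.findIdx_getElem (p := fun d => PySem.Str.isIn d t)
            (xs := pvDims) (w := hil)
        have hhead : pvFindAt (t :: l) (pvRank t) = some t := by
          simp [pvFindAt, hc', hp']
        have hlow : ∀ j ∈ List.range (pvRank t), pvFindAt (t :: l) j = pvFindAt l j := by
          intro j hj
          have hji : j < pvRank t := List.mem_range.mp hj
          have hjl : j < pvDims.length := lt_trans hji hil
          have hnp := List.not_of_lt_findIdx (p := fun d => PySem.Str.isIn d t)
            (xs := pvDims) (i := j) (h := hji)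
          have hnp' : PySem.Chars.isIn (pvDims[j]?.getD "").toList t.toList = false := by
            have h1 : pvDims[j]?.getD "" = pvDims[j]'hjl := by
              simp [List.getElem?_eq_getElem hjl]
            rw [h1]; simpa using hnp
          simp [pvFindAt, hc', hnp']
        rw [pvLoop, if_neg hc]
        simp only [if_pos hlt]
        rw [ih (some t) (pvRank t) (le_of_lt hil), hsplit, List.findSome?_append,
          List.findSome?_append, findSome?_congr_mem hlow]
        simp only [List.findSome?_cons, hhead]
        cases h : (List.range (pvRank t)).findSome? (pvFindAt l) <;> simp
      · -- rank ≥ r: t matches none of the first r dims, accumulator unchanged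
        have hf : ∀ j ∈ List.range r, pvFindAt (t :: l) j = pvFindAt l j := by
          intro j hj
          have hjr : j < r := List.mem_range.mp hj
          have hjrk : j < pvRank t := lt_of_lt_of_le hjr (not_lt.mp hlt)
          have hjl : j < pvDims.length := lt_of_lt_of_le hjr hr
          have hnp := List.not_of_lt_findIdx (p := fun d => PySem.Str.isIn d t)
            (xs := pvDims) (i := j) (h := hjrk)
          have hnp' : PySem.Chars.isIn (pvDims[j]?.getD "").toList t.toList = false := by
            have h1 : pvDims[j]?.getD "" = pvDims[j]'hjl := by
              simp [List.getElem?_eq_getElem hjl]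
            rw [h1]; simpa using hnp
          simp [pvFindAt, hc', hnp']
        rw [pvLoop, if_neg hc]
        simp only [if_neg hlt]
        rw [ih best r hr, findSome?_congr_mem hf]

-- A's chained search over the literal dims list is the range-6 chained search
lemma chainA_eq (l : List String) :
    pvDims.findSome? (fun dim =>
        l.find? (fun t => !PySem.Str.isIn "Cuda" t && PySem.Str.isIn dim t))
      = (List.range pvDims.length).findSome? (pvFindAt l) := by
  simp [pvDims, pvFindAt, List.range_succ, List.findSome?]

-- ===== VERDICT (by name: the statement is the Claim_ definition above) =====
theorem select_single_template_spec : Claim_equal_select_single_template := by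
  intro l _
  unfold Spec_select_single_template select_single_template select_single_template_alt
  rw [pvLoop_eq l none pvDims.length le_rfl, chainA_eq]
  cases h : (List.range pvDims.length).findSome? (pvFindAt l) <;> simp
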